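-- pv_equiv track=rewrite | github.com/RedBearAK/PDF-Manipulator | pdf_manipulator/core/page_range/patterns copy.py | _contains_unquoted_text
-- ===== SOURCE A (Python) =====
-- def _contains_unquoted_text(text: str, search_text: str) -> bool:
--     """Check if text contains search_text outside of quoted strings."""
--     if search_text not in text:
--         return False
--
--     in_quote = False
--     quote_char = None
--     i = 0
--
--     while i < len(text):
--         char = text[i]
--
--         # Handle escapes
--         if char == '\\' and i + 1 < len(text):
--             i += 2
--             continue
--
--         # Handle quotes
--         if char in ['"', "'"] and not in_quote:
--             in_quote = True
--             quote_char = char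
--         elif char == quote_char and in_quote:
--             in_quote = False
--             quote_char = None
--         elif not in_quote and text[i:i+len(search_text)] == search_text:
--             return True
--
--         i += 1
--
--     return False
-- ===== SOURCE B (Python) =====
-- def _contains_unquoted_text(text: str, search_text: str) -> bool:
--     """Check if text contains search_text outside of quoted strings."""
--     # Pass 1: record every index where an unquoted match would be allowed to start.
--     valid = set()
--     in_quote = False
--     quote_char = None
--     i = 0
--     n = len(text)
--     while i < n:
--         c = text[i]
--         if c == '\\' and i + 1 < n:
--             i += 2
--             continue
--         if not in_quote and c in '"\'':
--             in_quote = True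
--             quote_char = c
--         elif in_quote and c == quote_char:
--             in_quote = False
--             quote_char = None
--         elif not in_quote:
--             valid.add(i)
--         i += 1
--     # Pass 2: enumerate occurrence positions of search_text in the raw text.
--     pos = text.find(search_text)
--     while pos != -1:
--         if pos in valid:
--             return True
--         if pos >= n:
--             break
--         pos = text.find(search_text, pos + 1)
--     return False
-- ===== Notes on version B (the rewrite author's own statement) =====
-- stated objective: alternative
-- what changed: A interleaves quote/escape tracking with a substring test at every scanned position in one loop; B makes two separate passes: it first collects the set of valid unquoted start indices with the scanner state machine, then enumerates the actual occurrence positions of search_text with str.find and returns True iff one lies in the set.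
import Mathlib
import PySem

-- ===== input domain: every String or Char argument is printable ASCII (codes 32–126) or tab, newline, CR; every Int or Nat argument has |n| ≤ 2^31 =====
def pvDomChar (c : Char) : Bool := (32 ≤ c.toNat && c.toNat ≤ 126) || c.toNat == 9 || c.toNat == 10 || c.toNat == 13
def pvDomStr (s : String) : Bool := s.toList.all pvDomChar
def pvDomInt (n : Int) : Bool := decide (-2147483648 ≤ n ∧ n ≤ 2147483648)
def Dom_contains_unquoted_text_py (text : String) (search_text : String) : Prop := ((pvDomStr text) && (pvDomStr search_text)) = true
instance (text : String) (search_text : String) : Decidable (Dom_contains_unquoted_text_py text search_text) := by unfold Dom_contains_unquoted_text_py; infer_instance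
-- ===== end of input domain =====

-- B re-decomposes A's single scan into two passes (collect the set of valid unquoted start
-- indices, then walk the raw-text occurrences of search_text via find); same return value,
-- objective: alternative decomposition, no speed claim.

-- ===== PORT A =====
-- A's while loop; text[i:i+len(search_text)] == search_text is exact as
-- (s.drop i).take t.length = t since 0 ≤ i and Python slicing clamps.
def aLoop (s t : List Char) (i : Nat) (inq : Bool) (qc : Option Char) : Bool :=
  if _h : i < s.length then
    let c := s[i]
    if c = '\\' ∧ i + 1 < s.length then aLoop s t (i + 2) inq qc
    else if (c = '"' ∨ c = '\'') ∧ inq = false then aLoop s t (i + 1) true (some c)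
    else if some c = qc ∧ inq = true then aLoop s t (i + 1) false none
    else if inq = false ∧ (s.drop i).take t.length = t then true
    else aLoop s t (i + 1) inq qc
  else false
termination_by s.length - i

-- 'search_text not in text' is Python substring membership = list-infix on the char lists.
def contains_unquoted_text_py (text : String) (search_text : String) : Bool :=
  let s := text.toList
  let t := search_text.toList
  if ¬ decide (t <:+: s) then false
  else aLoop s t 0 false none

-- ===== PORT B =====
-- Pass 1 of Source B: the set of indices where an unquoted match may start.
def bValid (s : List Char) (i : Nat) (inq : Bool) (qc : Option Char) (acc : PySem.Set Nat) :
    PySem.Set Nat :=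
  if _h : i < s.length then
    let c := s[i]
    if c = '\\' ∧ i + 1 < s.length then bValid s (i + 2) inq qc acc
    else if inq = false ∧ (c = '"' ∨ c = '\'') then bValid s (i + 1) true (some c) acc
    else if inq = true ∧ some c = qc then bValid s (i + 1) false none acc
    else if inq = false then bValid s (i + 1) inq qc (PySem.Set.add acc i)
    else bValid s (i + 1) inq qc acc
  else acc
termination_by s.length - i

-- hand port of Python str.find(sub, start) for 0 ≤ start, none standing for -1:
-- first p with start ≤ p ≤ len(s) and s[p:p+len(sub)] == sub (exact on this domain).
def bFindFrom (s t : List Char) (pos : Nat) : Option Nat :=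
  if _h : s.length < pos then none
  else if (s.drop pos).take t.length = t then some pos
  else bFindFrom s t (pos + 1)
termination_by s.length + 1 - pos

-- needed by bScan's termination proof (cited in decreasing_by)
theorem bFindFrom_ge {s t : List Char} {pos p : Nat} (h : bFindFrom s t pos = some p) :
    pos ≤ p := by
  fun_induction bFindFrom s t pos with
  | case1 => simp at h
  | case2 => simp_all
  | case3 _ _ _ ih => exact Nat.le_of_succ_le (ih h)

-- Pass 2 of Source B: walk the occurrence positions until one is in the valid set.
def bScan (s t : List Char) (V : PySem.Set Nat) (pos : Nat) : Bool :=
  match hf : bFindFrom s t pos with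
  | none => false
  | some p =>
    if PySem.Set.contains V p then true
    else if s.length ≤ p then false
    else bScan s t V (p + 1)
termination_by s.length + 1 - pos
decreasing_by
  have := bFindFrom_ge hf
  omega

def contains_unquoted_text_py_alt (text : String) (search_text : String) : Bool :=
  let s := text.toList
  let t := search_text.toList
  let valid := bValid s 0 false none PySem.Set.empty
  bScan s t valid 0

-- ===== PRECONDITION & SPEC =====
def Spec_contains_unquoted_text_py (text : String) (search_text : String) (out : Bool) : Prop := out = contains_unquoted_text_py_alt text search_text
instance (text : String) (search_text : String) (out : Bool) : Decidable (Spec_contains_unquoted_text_py text search_text out) := by unfold Spec_contains_unquoted_text_py; infer_instance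

-- ===== CLAIM (what is proved, stated in full; the proofs are below) =====
def Claim_equal_contains_unquoted_text_py : Prop := ∀ (text : String) (search_text : String), Dom_contains_unquoted_text_py text search_text → Spec_contains_unquoted_text_py text search_text (contains_unquoted_text_py text search_text)

-- ===== LEMMAS AND PROOFS =====

-- The pure list of valid match-start indices from a given scanner state.
def validFrom (s : List Char) (i : Nat) (inq : Bool) (qc : Option Char) : List Nat :=
  if _h : i < s.length then
    let c := s[i]
    if c = '\\' ∧ i + 1 < s.length then validFrom s (i + 2) inq qc
    else if inq = false ∧ (c = '"' ∨ c = '\'') then validFrom s (i + 1) true (some c)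
    else if inq = true ∧ some c = qc then validFrom s (i + 1) false none
    else if inq = false then i :: validFrom s (i + 1) inq qc
    else validFrom s (i + 1) inq qc
  else []
termination_by s.length - i

theorem validFrom_lt {s : List Char} {i : Nat} {inq : Bool} {qc : Option Char} {j : Nat}
    (h : j ∈ validFrom s i inq qc) : j < s.length := by
  fun_induction validFrom s i inq qc with
  | case1 i inq qc hlt c hesc ih => exact ih h
  | case2 i inq qc hlt c hesc hq ih => exact ih h
  | case3 i inq qc hlt c hesc hq hcl ih => exact ih h
  | case4 i qc hlt c hesc hq hcl ih =>
    rcases List.mem_cons.mp h with rfl | h'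
    · exact hlt
    · exact ih h'
  | case5 i inq qc hlt c hesc hq hcl hnq ih => exact ih h
  | case6 i inq qc hlt => simp at h

theorem aLoop_eq_exists (s t : List Char) (i : Nat) (inq : Bool) (qc : Option Char) :
    aLoop s t i inq qc = true ↔
      ∃ j ∈ validFrom s i inq qc, (s.drop j).take t.length = t := by
  fun_induction aLoop s t i inq qc with
  | case1 i inq qc hlt c hesc ih =>
    rw [validFrom.eq_def]
    simp only [dif_pos hlt]
    split_ifs with g1 g2 g3 g4 <;> first | exact ih | tauto
  | case2 i inq qc hlt c hesc hq ih =>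
    rw [validFrom.eq_def]
    simp only [dif_pos hlt]
    split_ifs with g1 g2 g3 g4 <;> first | exact ih | tauto
  | case3 i inq qc hlt c hesc hq hcl ih =>
    rw [validFrom.eq_def]
    simp only [dif_pos hlt]
    split_ifs with g1 g2 g3 g4 <;> first | exact ih | tauto
  | case4 i inq qc hlt c hesc hq hcl hm =>
    rw [validFrom.eq_def]
    simp only [dif_pos hlt]
    split_ifs with g1 g2 g3 g4
    · tauto
    · tauto
    · exact absurd g3.1 (by simp [hm.1])
    · exact ⟨fun _ => ⟨i, List.mem_cons_self, hm.2⟩, fun _ => trivial⟩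
    · exact absurd hm.1 g4
  | case5 i inq qc hlt c hesc hq hcl hm ih =>
    rw [validFrom.eq_def]
    simp only [dif_pos hlt]
    split_ifs with g1 g2 g3 g4
    · tauto
    · tauto
    · tauto
    · rw [ih]
      have hno : ¬ (s.drop i).take t.length = t := fun ho => hm ⟨g4, ho⟩
      constructor
      · rintro ⟨j, hj, hjo⟩; exact ⟨j, List.mem_cons_of_mem _ hj, hjo⟩
      · rintro ⟨j, hj, hjo⟩
        rcases List.mem_cons.mp hj with rfl | hj'
        · exact absurd hjo hno
        · exact ⟨j, hj', hjo⟩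
    · exact ih
  | case6 i inq qc hlt =>
    rw [validFrom.eq_def]
    simp [hlt]

set_option maxHeartbeats 1000000 in
theorem mem_bValid (s : List Char) (i : Nat) (inq : Bool) (qc : Option Char)
    (acc : PySem.Set Nat) (j : Nat) :
    j ∈ bValid s i inq qc acc ↔ j ∈ acc ∨ j ∈ validFrom s i inq qc := by
  fun_induction bValid s i inq qc acc with
  | case1 i inq qc acc hlt c hesc ih =>
    rw [validFrom.eq_def]
    simp only [dif_pos hlt]
    split_ifs with g1 g2 g3 g4 <;> first | exact ih | tauto
  | case2 i inq qc acc hlt c hesc hq ih =>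
    rw [validFrom.eq_def]
    simp only [dif_pos hlt]
    split_ifs with g1 g2 g3 g4 <;> first | exact ih | tauto
  | case3 i inq qc acc hlt c hesc hq hcl ih =>
    rw [validFrom.eq_def]
    simp only [dif_pos hlt]
    split_ifs with g1 g2 g3 g4 <;> first | exact ih | tauto
  | case4 i qc acc hlt c hesc hq hcl ih =>
    rw [validFrom.eq_def]
    simp only [dif_pos hlt]
    split_ifs with g1 g2 g3 g4
    · tauto
    · tauto
    · simp at g3
    · rw [ih, PySem.Set.mem_add]
      simp only [List.mem_cons]
      tauto
  | case5 i inq qc acc hlt c hesc hq hcl hnq ih =>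
    rw [validFrom.eq_def]
    simp only [dif_pos hlt]
    split_ifs with g1 g2 g3 g4 <;> first | exact ih | tauto
  | case6 i inq qc acc hlt =>
    rw [validFrom.eq_def]
    simp [hlt]

theorem bFindFrom_some {s t : List Char} {pos p : Nat} (h : bFindFrom s t pos = some p) :
    (s.drop p).take t.length = t ∧ ∀ q, pos ≤ q → q < p → ¬ (s.drop q).take t.length = t := by
  fun_induction bFindFrom s t pos with
  | case1 => simp at h
  | case2 pos h1 h2 =>
    obtain rfl : pos = p := by simpa using h
    exact ⟨h2, fun q hq1 hq2 _ => by omega⟩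
  | case3 pos h1 h2 ih =>
    obtain ⟨ho, hmin⟩ := ih h
    refine ⟨ho, fun q hq1 hq2 hq3 => ?_⟩
    rcases Nat.eq_or_lt_of_le hq1 with rfl | hlt
    · exact h2 hq3
    · exact hmin q hlt hq2 hq3

theorem bFindFrom_none {s t : List Char} {pos : Nat} (h : bFindFrom s t pos = none) :
    ∀ q, pos ≤ q → q ≤ s.length → ¬ (s.drop q).take t.length = t := by
  fun_induction bFindFrom s t pos with
  | case1 pos h1 => intro q hq1 hq2 _; omega
  | case2 => simp at h
  | case3 pos h1 h2 ih =>
    intro q hq1 hq2 hq3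
    rcases Nat.eq_or_lt_of_le hq1 with rfl | hlt
    · exact h2 hq3
    · exact ih h q hlt hq2 hq3

theorem bScan_eq_exists (s t : List Char) (V : PySem.Set Nat) (pos : Nat)
    (hV : ∀ j, j ∈ V → j < s.length) :
    bScan s t V pos = true ↔
      ∃ p, pos ≤ p ∧ (s.drop p).take t.length = t ∧ p ∈ V := by
  fun_induction bScan s t V pos with
  | case1 pos hf =>
    simp only [Bool.false_eq_true, false_iff]
    rintro ⟨p, hp1, hp2, hp3⟩
    exact bFindFrom_none hf p hp1 (Nat.le_of_lt (hV p hp3)) hp2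
  | case2 pos p hf hc =>
    obtain ⟨ho, _⟩ := bFindFrom_some hf
    simp only [true_iff]
    exact ⟨p, bFindFrom_ge hf, ho, (PySem.Set.contains_iff V p).mp hc⟩
  | case3 pos p hf hc hend =>
    obtain ⟨_, hmin⟩ := bFindFrom_some hf
    simp only [Bool.false_eq_true, false_iff]
    rintro ⟨q, hq1, hq2, hq3⟩
    have hqlt : q < s.length := hV q hq3
    have : ¬ q < p := fun hlt => hmin q hq1 hlt hq2
    omega
  | case4 pos p hf hc hend ih =>
    rw [ih]
    obtain ⟨_, hmin⟩ := bFindFrom_some hf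
    constructor
    · rintro ⟨q, hq1, hq2, hq3⟩
      exact ⟨q, le_trans (bFindFrom_ge hf) (by omega), hq2, hq3⟩
    · rintro ⟨q, hq1, hq2, hq3⟩
      have hne : q ≠ p := fun hEq =>
        hc (by rw [hEq] at hq3; exact (PySem.Set.contains_iff V p).mpr hq3)
      have : ¬ q < p := fun hlt => hmin q hq1 hlt hq2
      exact ⟨q, by omega, hq2, hq3⟩

theorem occ_isInfix {s t : List Char} {p : Nat} (h : (s.drop p).take t.length = t) :
    t <:+: s := by
  have h1 : t <+: s.drop p := by rw [← h]; exact List.take_prefix _ _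
  exact h1.isInfix.trans (s.drop_suffix p).isInfix

-- ===== VERDICT (by name: the statement is the Claim_ definition above) =====
theorem contains_unquoted_text_py_spec : Claim_equal_contains_unquoted_text_py := by
  intro text search_text _
  unfold Spec_contains_unquoted_text_py
  unfold contains_unquoted_text_py contains_unquoted_text_py_alt
  set s := text.toList
  set t := search_text.toList
  have hV : ∀ j, j ∈ bValid s 0 false none PySem.Set.empty → j < s.length := by
    intro j hj
    rcases (mem_bValid s 0 false none PySem.Set.empty j).mp hj with h | h
    · simp [PySem.Set.empty] at h
    · exact validFrom_lt h
  rw [Bool.eq_iff_iff]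
  rw [bScan_eq_exists s t _ 0 hV]
  by_cases hin : t <:+: s
  · rw [if_neg (by simp [hin])]
    rw [aLoop_eq_exists]
    constructor
    · rintro ⟨j, hj, hjo⟩
      exact ⟨j, Nat.zero_le j, hjo,
        (mem_bValid s 0 false none PySem.Set.empty j).mpr (Or.inr hj)⟩
    · rintro ⟨p, _, hpo, hpV⟩
      rcases (mem_bValid s 0 false none PySem.Set.empty p).mp hpV with h | h
      · simp [PySem.Set.empty] at h
      · exact ⟨p, h, hpo⟩
  · rw [if_pos (by simp [hin])]
    simp only [Bool.false_eq_true, false_iff]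
    rintro ⟨p, _, hpo, _⟩
    exact hin (occ_isInfix hpo)
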